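-- pv_equiv track=rewrite | github.com/OneVth/programmers-python | Lv0/120882/solution.py | solution_v3
-- ===== SOURCE A (Python) =====
-- def solution_v3(score: list[list[int]]) -> list[int]:
--     """
--     [Approach] enumerate + 딕셔너리 - 첫 등장 인덱스만 저장하여 공동 등수 처리
--                v1보다 간결하고, v2보다 효율적 (O(N) vs O(N²))
--     [Time] O(N log N) - 정렬
--     [Space] O(N) - 딕셔너리와 리스트
--     """
--     sums = [sum(s) for s in score]
--     sorted_sums = sorted(sums, reverse=True)
--     rank_dict = dict()
--     for i, r in enumerate(sorted_sums):
--         if r not in rank_dict: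
--             rank_dict[r] = i + 1
--
--     return [rank_dict[s] for s in sums]
-- ===== SOURCE B (Python) =====
-- def solution_v3(score: list[list[int]]) -> list[int]:
--     sums = [sum(s) for s in score]
--     return [1 + sum(1 for t in sums if t > s) for s in sums]
-- ===== Notes on version B (the rewrite author's own statement) =====
-- stated objective: simpler
-- what changed: Replaces the sort plus first-occurrence rank dictionary with a direct count: each row's rank is 1 + the number of strictly greater row sums.
import Mathlib
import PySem

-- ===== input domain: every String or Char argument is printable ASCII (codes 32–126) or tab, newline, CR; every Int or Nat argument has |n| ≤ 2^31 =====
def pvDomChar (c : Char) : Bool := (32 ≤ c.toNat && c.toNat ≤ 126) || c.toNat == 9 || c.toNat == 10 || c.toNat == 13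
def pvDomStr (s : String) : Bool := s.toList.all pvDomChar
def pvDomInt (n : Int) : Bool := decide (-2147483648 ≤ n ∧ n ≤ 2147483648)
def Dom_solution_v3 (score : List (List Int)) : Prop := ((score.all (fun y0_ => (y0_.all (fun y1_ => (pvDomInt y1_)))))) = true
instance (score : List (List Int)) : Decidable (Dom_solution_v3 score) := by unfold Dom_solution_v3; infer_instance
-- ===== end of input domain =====

-- B replaces A's sort + first-occurrence rank dictionary by a direct count (rank = 1 + number of strictly greater row sums): simpler, no auxiliary table.


-- ===== PORT A =====
-- the body of A's dict-building loop: 'if r not in rank_dict: rank_dict[r] = i + 1'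
def rankStep (d : PySem.Dict Int Int) (p : Int × Int) : PySem.Dict Int Int :=
  if d.contains p.2 = false then d.insert p.2 (p.1 + 1) else d

def solution_v3 (score : List (List Int)) : List Int :=
  let sums := score.map (fun s => s.sum)
  let sortedSums := PySem.List.sorted sums (fun x => x) true
  let rankDict := (PySem.List.enumerate sortedSums 0).foldl rankStep PySem.Dict.empty
  -- 'rank_dict[s]' never raises: every s in sums occurs in sorted_sums; getD 0 is the total form
  sums.map (fun s => rankDict.getD s 0)

-- ===== PORT B =====
def solution_v3_alt (score : List (List Int)) : List Int :=
  let sums := score.map (fun s => s.sum)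
  sums.map (fun s => 1 + ((sums.countP (fun t => decide (s < t)) : Nat) : Int))

-- ===== PRECONDITION & SPEC =====
def Spec_solution_v3 (score : List (List Int)) (out : List Int) : Prop := out = solution_v3_alt score
instance (score : List (List Int)) (out : List Int) : Decidable (Spec_solution_v3 score out) := by unfold Spec_solution_v3; infer_instance

-- ===== CLAIM (what is proved, stated in full; the proofs are below) =====
def Claim_equal_solution_v3 : Prop := ∀ (score : List (List Int)), Dom_solution_v3 score → Spec_solution_v3 score (solution_v3 score)

-- ===== LEMMAS AND PROOFS =====

-- once a key is bound, A's loop never changes it (it only inserts missing keys)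
theorem fold_rankStep_get_some (l : List (Int × Int)) (d : PySem.Dict Int Int) (k v : Int)
    (h : d.get? k = some v) : (l.foldl rankStep d).get? k = some v := by
  induction l generalizing d with
  | nil => exact h
  | cons p t ih =>
    simp only [List.foldl_cons]
    apply ih
    unfold rankStep
    split
    · rcases eq_or_ne k p.2 with hk | hk
      · subst hk
        rename_i hc
        rw [PySem.Dict.contains_eq_isSome_get?, h] at hc
        simp at hc
      · rw [PySem.Dict.get?_insert_of_ne _ _ hk, h]
    · exact h

-- folding over pairs whose keys avoid k leaves k unbound
theorem fold_rankStep_get_none (l : List (Int × Int)) (d : PySem.Dict Int Int) (k : Int)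
    (hm : ∀ p ∈ l, p.2 ≠ k) (h : d.get? k = none) : (l.foldl rankStep d).get? k = none := by
  induction l generalizing d with
  | nil => exact h
  | cons p t ih =>
    simp only [List.foldl_cons]
    apply ih _ (fun q hq => hm q (List.mem_cons_of_mem _ hq))
    unfold rankStep
    split
    · have hne : k ≠ p.2 := Ne.symm (hm p List.mem_cons_self)
      rw [PySem.Dict.get?_insert_of_ne _ _ hne]
      exact h
    · exact h

-- the dictionary A builds from a descending list maps s to (index of first occurrence) + 1
theorem rankDict_get (pre post : List Int) (s : Int) (hs : s ∉ pre) :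
    ((PySem.List.enumerate (pre ++ s :: post) 0).foldl rankStep PySem.Dict.empty).get? s
      = some ((pre.length : Int) + 1) := by
  rw [PySem.List.enumerate_append, List.foldl_append, PySem.List.enumerate_cons, List.foldl_cons]
  set D := (PySem.List.enumerate pre 0).foldl rankStep PySem.Dict.empty with hD
  have h1 : D.get? s = none := by
    rw [hD]
    apply fold_rankStep_get_none
    · intro p hp he
      have := PySem.List.map_snd_enumerate pre (0 : Int) ▸ List.mem_map_of_mem hp
      exact hs (he ▸ this)
    · exact PySem.Dict.get?_empty s
  apply fold_rankStep_get_some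
  have hc : D.contains s = false := by rw [PySem.Dict.contains_eq_isSome_get?, h1]; rfl
  simp [rankStep, hc, PySem.Dict.get?_insert_self]

-- the key pointwise fact: A's rank of s equals 1 + (# strictly greater sums)
theorem rank_eq_count (sums : List Int) (s : Int) (hmem : s ∈ sums) :
    ((PySem.List.enumerate (PySem.List.sorted sums (fun x => x) true) 0).foldl rankStep
        PySem.Dict.empty).getD s 0
      = 1 + ((sums.countP (fun t => decide (s < t)) : Nat) : Int) := by
  set l := PySem.List.sorted sums (fun x => x) true with hl
  have hsl : s ∈ l := by rw [hl]; exact (PySem.List.mem_sorted _ _ _ _).2 hmem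
  obtain ⟨pre, post, hdec, hpre⟩ := List.eq_append_cons_of_mem hsl
  have hperm : l.Perm sums := PySem.List.sorted_perm sums (fun x => x) true
  have hpw : l.Pairwise (fun a b => b ≤ a) := PySem.List.sorted_pairwise_rev sums (fun x => x)
  rw [hdec] at hpw
  rw [List.pairwise_append] at hpw
  obtain ⟨_, hpw2, hcross⟩ := hpw
  have hcount : sums.countP (fun t => decide (s < t)) = pre.length := by
    rw [← hperm.countP_eq, hdec, List.countP_append, List.countP_cons]
    have h1 : pre.countP (fun t => decide (s < t)) = pre.length := by
      apply List.countP_eq_length.2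
      intro a ha
      have hle : s ≤ a := hcross a ha s (List.mem_cons_self)
      have hne : s ≠ a := fun he => hpre (he ▸ ha)
      simp only [decide_eq_true_eq]; omega
    have h2 : post.countP (fun t => decide (s < t)) = 0 := by
      apply List.countP_eq_zero.2
      intro a ha
      have hle : a ≤ s := (List.pairwise_cons.1 hpw2).1 a ha
      simp only [decide_eq_true_eq]; omega
    simp [h1, h2]
  rw [hdec, PySem.Dict.getD_eq_get?_getD, rankDict_get pre post s hpre, hcount]
  simp [Option.getD]
  omega

-- ===== VERDICT (by name: the statement is the Claim_ definition above) =====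
theorem solution_v3_spec : Claim_equal_solution_v3 := by
  intro score _
  unfold Spec_solution_v3 solution_v3 solution_v3_alt
  apply List.map_congr_left
  intro s hs
  exact rank_eq_count (score.map (fun s => s.sum)) s hs
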